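-- pv_equiv track=rewrite | github.com/jobh/latex.py | latex.py | consume_args
-- ===== SOURCE A (Python) =====
-- def consume_arg(l, brak):
--     level = 0
--     pos = 0
--     for c in l:
--         if   c == brak[0]: level += 1
--         elif c == brak[1]: level -= 1
--         pos += 1
--         if level == 0:
--             (arg, rest_of_line) = l[1:pos-1], l[pos:]
--             assert not '"""' in arg
--             return ('r"""%s"""'%arg, rest_of_line)
--     raise TypeError('Argument not closed')
--
-- def consume_args(l):
--     args = []
--     optarg = None
--     pos = 0
--     while len(l) > pos and l[pos] == ' ':
--         pos += 1
--     if len(l) > pos and l[pos] == '[':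
--         (optarg,l) = consume_arg(l[pos:], '[]')
--     while True:
--         pos = 0
--         while len(l) > pos and l[pos] == ' ':
--             pos += 1
--         if len(l) <= pos or l[pos] != '{':
--             if optarg: args.append(optarg)
--             return args, l
--         (arg,l) = consume_arg(l[pos:], '{}')
--         args.append(arg)
-- ===== SOURCE B (Python) =====
-- def consume_args(l):
--     # Single cursor-based pass: an integer index into l, one inner scanner that
--     # advances past a balanced group; only group contents and the tail are sliced.
--     s = l
--     n = len(s)
--
--     def scan(i, op, cl):
--         # s[i] is op; return (content, index just past the closing bracket)
--         level = 0
--         j = i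
--         while j < n:
--             c = s[j]
--             if c == op:
--                 level += 1
--             elif c == cl:
--                 level -= 1
--             j += 1
--             if level == 0:
--                 return s[i + 1:j - 1], j
--         raise TypeError('Argument not closed')
--
--     args = []
--     optarg = None
--     i = 0
--     j = 0
--     while j < n and s[j] == ' ':
--         j += 1
--     if j < n and s[j] == '[':
--         content, i = scan(j, '[', ']')
--         assert '"""' not in content
--         optarg = 'r"""%s"""' % content
--     while True:
--         j = i
--         while j < n and s[j] == ' ':
--             j += 1
--         if j >= n or s[j] != '{':
--             break
--         content, i = scan(j, '{', '}')
--         assert '"""' not in content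
--         args.append('r"""%s"""' % content)
--     if optarg is not None:
--         args.append(optarg)
--     return args, s[i:]
-- ===== Notes on version B (the rewrite author's own statement) =====
-- stated objective: alternative
-- what changed: Replaced A's slice-and-restart parsing (helper re-called on a fresh substring of l for every group, l reassigned to a new substring each iteration) with a single cursor-based pass that keeps an integer index into the original string and only slices out group contents and the final tail.
-- outside the precondition, e.g. on consume_args('{ab'): A raises TypeError, B raises TypeError; on consume_args('{a"""b}'): A raises AssertionError, B raises AssertionError
import Mathlib
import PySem

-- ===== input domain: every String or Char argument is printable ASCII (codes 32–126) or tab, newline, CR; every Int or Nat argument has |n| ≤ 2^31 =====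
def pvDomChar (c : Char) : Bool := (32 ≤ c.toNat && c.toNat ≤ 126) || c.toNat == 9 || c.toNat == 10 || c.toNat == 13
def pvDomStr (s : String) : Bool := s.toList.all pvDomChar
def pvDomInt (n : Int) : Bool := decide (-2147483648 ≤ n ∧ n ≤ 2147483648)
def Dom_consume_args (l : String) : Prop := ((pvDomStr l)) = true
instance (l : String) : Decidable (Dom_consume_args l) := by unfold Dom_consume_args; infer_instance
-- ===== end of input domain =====

-- B replaces A's slice-and-restart parsing (a fresh substring of l per group) by one
-- cursor-based pass with an integer index into the original string; only group contents
-- and the final tail are sliced.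

-- ===== PORT A =====
-- '"""' in arg  (substring membership, ported by hand; exact for any List Char)
def pvHasTQ : List Char → Bool
  | '"' :: '"' :: '"' :: _ => true
  | _ :: rest => pvHasTQ rest
  | [] => false

-- 'r"""%s"""' % arg : %-formatting with a single %s is concatenation
def pvFmt (arg : List Char) : List Char := 'r' :: '"' :: '"' :: '"' :: arg ++ ['"', '"', '"']

-- consume_arg's for-loop; brak[0]/brak[1] passed as b0/b1 (call sites use 2-char literals).
-- none = TypeError ('Argument not closed') or AssertionError ('"""' in arg).
-- l[1:pos-1] / l[pos:] with 1 ≤ pos ≤ len l are exactly drop/take (no negative indices arise).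
def consumeArgA (cs orig : List Char) (b0 b1 : Char) (level : Int) (pos : Nat) :
    Option (List Char × List Char) :=
  match cs with
  | [] => none
  | c :: rest =>
    let level := if c = b0 then level + 1 else if c = b1 then level - 1 else level
    let pos := pos + 1
    if level = 0 then
      let arg := (orig.drop 1).take (pos - 2)
      if pvHasTQ arg then none else some (pvFmt arg, orig.drop pos)
    else consumeArgA rest orig b0 b1 level pos

-- pos = 0; while len(l) > pos and l[pos] == ' ': pos += 1
def countSpacesA : List Char → Nat
  | ' ' :: rest => countSpacesA rest + 1
  | _ => 0

-- the 'while True' loop; fuel l.length + 1 suffices (each iteration strictly shortens l,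
-- so the fuel guard is never the reason a 'none' is returned).
def consumeArgsLoopA (fuel : Nat) (l : List Char) (args : List (List Char))
    (optarg : Option (List Char)) : Option (List (List Char) × List Char) :=
  match fuel with
  | 0 => none
  | fuel + 1 =>
    let pos := countSpacesA l
    match l.drop pos with
    | c :: _ =>
      if c = '{' then
        match consumeArgA (l.drop pos) (l.drop pos) '{' '}' 0 0 with
        | none => none
        | some (arg, l') => consumeArgsLoopA fuel l' (args ++ [arg]) optarg
      else
        some ((match optarg with
               | some o => if o.isEmpty then args else args ++ [o]
               | none => args), l)
    | [] =>
      some ((match optarg with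
             | some o => if o.isEmpty then args else args ++ [o]
             | none => args), l)

-- the body of consume_args up to the final return (none = an exception propagates)
def resA (cs : List Char) : Option (List (List Char) × List Char) :=
  let pos := countSpacesA cs
  match cs.drop pos with
  | '[' :: _ =>
    match consumeArgA (cs.drop pos) (cs.drop pos) '[' ']' 0 0 with
    | none => none
    | some (optarg, l1) => consumeArgsLoopA (l1.length + 1) l1 [] (some optarg)
  | _ => consumeArgsLoopA (cs.length + 1) cs [] none

def consume_args (l : String) : List String × String :=
  match resA l.toList with
  | some (args, rest) => (args.map String.ofList, String.ofList rest)
  | none => ([], "")   -- unreachable inside Pre_ (A raises there)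

-- ===== PORT B =====
-- while j < n and s[j] == ' ': j += 1
def skipB (s : List Char) (j : Nat) : Nat :=
  if h : j < s.length then
    if s[j] = ' ' then skipB s (j + 1) else j
  else j
termination_by s.length - j

-- the inner 'scan' while-loop: returns the index just past the closing bracket;
-- none = TypeError ('Argument not closed')
def scanB (s : List Char) (op cl : Char) (level : Int) (j : Nat) : Option Nat :=
  if h : j < s.length then
    let c := s[j]
    let level := if c = op then level + 1 else if c = cl then level - 1 else level
    if level = 0 then some (j + 1) else scanB s op cl level (j + 1)
  else none
termination_by s.length - j

-- s[i+1:j-1] with 0 ≤ i+1, 0 ≤ j-1 in range: exactly drop/take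
def contentB (s : List Char) (i j : Nat) : List Char := (s.drop (i + 1)).take (j - 1 - (i + 1))

-- the 'while True' loop of B; returns collected args and the cursor i (pre-skip);
-- fuel s.length + 1 suffices (the cursor strictly advances each iteration).
def loopB (s : List Char) (fuel : Nat) (i : Nat) (args : List (List Char)) :
    Option (List (List Char) × Nat) :=
  match fuel with
  | 0 => none
  | fuel + 1 =>
    let j := skipB s i
    if h : j < s.length then
      if s[j] = '{' then
        match scanB s '{' '}' 0 j with
        | none => none
        | some j' =>
          let content := contentB s j j'
          if pvHasTQ content then none
          else loopB s fuel j' (args ++ [pvFmt content])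
      else some (args, i)
    else some (args, i)

-- the body of consume_args (B) up to the final return: collected args and final cursor
def resB (s : List Char) : Option (List (List Char) × Nat) :=
  let j := skipB s 0
  let step1 : Option (Option (List Char) × Nat) :=
    if h : j < s.length then
      if s[j] = '[' then
        match scanB s '[' ']' 0 j with
        | none => none
        | some j' =>
          let content := contentB s j j'
          if pvHasTQ content then none else some (some (pvFmt content), j')
      else some (none, 0)
    else some (none, 0)
  match step1 with
  | none => none
  | some (optarg, i1) =>
    match loopB s (s.length + 1) i1 [] with
    | none => none
    | some (args, i2) =>
      some (args ++ (match optarg with | some o => [o] | none => []), i2)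

def consume_args_alt (l : String) : List String × String :=
  match resB l.toList with
  | some (args, i2) => (args.map String.ofList, String.ofList (l.toList.drop i2))
  | none => ([], "")   -- unreachable inside Pre_ (B raises there)

-- ===== PRECONDITION & SPEC =====
-- Pre_ excludes exactly the inputs on which A raises: a '[' / '{' group that is opened but
-- never closed at bracket level 0 (TypeError) or a group whose content contains '"""'
-- (AssertionError).  Stated as a grammar over the input: spaces, an optional balanced
-- []-group, then repeatedly spaces + a balanced {}-group, with no group content
-- containing '"""'.
-- pvGroup cl op cs d: split cs into (content, rest-after-the-cl-closing-depth-d); none if never closed.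
def pvGroup (cl op : Char) : List Char → Nat → Option (List Char × List Char)
  | [], _ => none
  | c :: rest, d =>
    if c = cl then
      if d = 0 then some ([], rest)
      else (pvGroup cl op rest (d - 1)).map (fun p => (c :: p.1, p.2))
    else if c = op then (pvGroup cl op rest (d + 1)).map (fun p => (c :: p.1, p.2))
    else (pvGroup cl op rest d).map (fun p => (c :: p.1, p.2))

-- The fuel argument (always called with length + 1) only makes the grammar check
-- structurally recursive so that the kernel can evaluate it: a balanced group consumes
-- at least one character, so the fuel never runs out.
def pvOkTail : Nat → List Char → Bool
  | 0, _ => false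
  | fuel + 1, s =>
    match s.dropWhile (· = ' ') with
    | '{' :: rest =>
      match pvGroup '}' '{' rest 0 with
      | none => false
      | some (a, r) => !pvHasTQ a && pvOkTail fuel r
    | _ => true

def Pre_consume_args (l : String) : Prop :=
  (let s := l.toList
   match s.dropWhile (· = ' ') with
   | '[' :: rest =>
     match pvGroup ']' '[' rest 0 with
     | none => false
     | some (a, r) => !pvHasTQ a && pvOkTail (r.length + 1) r
   | _ => pvOkTail (s.length + 1) s) = true
instance (l : String) : Decidable (Pre_consume_args l) := by unfold Pre_consume_args; infer_instance

def pvWitness_consume_args : String := "  [op t]{a} {b{c}} tail"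

def Spec_consume_args (l : String) (out : List String × String) : Prop := out = consume_args_alt l
instance (l : String) (out : List String × String) : Decidable (Spec_consume_args l out) := by unfold Spec_consume_args; infer_instance

-- ===== CLAIM (what is proved, stated in full; the proofs are below) =====
def Claim_equal_consume_args : Prop := ∀ (l : String), Dom_consume_args l → Pre_consume_args l → Spec_consume_args l (consume_args l)

-- ===== LEMMAS AND PROOFS =====

theorem countSpacesA_cons (c : Char) (rest : List Char) :
    countSpacesA (c :: rest) = if c = ' ' then countSpacesA rest + 1 else 0 := by
  by_cases h : c = ' '
  · subst h; simp [countSpacesA]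
  · rw [if_neg h, countSpacesA.eq_def]
    split
    · simp_all
    · rfl

theorem skipB_eq (s : List Char) : ∀ j, skipB s j = j + countSpacesA (s.drop j) := by
  intro j
  fun_induction skipB s j with
  | case1 j h hsp ih =>
    have hdrop : s.drop j = s[j] :: s.drop (j+1) := List.drop_eq_getElem_cons h
    rw [ih, hdrop, hsp, countSpacesA_cons]
    simp; omega
  | case2 j h hsp =>
    have hdrop : s.drop j = s[j] :: s.drop (j+1) := List.drop_eq_getElem_cons h
    rw [hdrop, countSpacesA_cons, if_neg hsp]
    omega
  | case3 j h =>
    have : s.drop j = [] := by rw [List.drop_eq_nil_iff]; omega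
    simp [this, countSpacesA]

theorem scanB_lt (s : List Char) (op cl : Char) :
    ∀ level j j', scanB s op cl level j = some j' → j < j' ∧ j' ≤ s.length := by
  intro level j
  fun_induction scanB s op cl level j
  all_goals intro j' hj'
  · simp only [Option.some.injEq] at hj'; omega
  · rename_i ih; have := ih j' hj'; omega
  · simp at hj'
theorem scan_corr (s : List Char) (b0 b1 : Char) :
    ∀ (cs orig : List Char) (j : Nat) (level : Int) (pos : Nat), cs = s.drop j →
      consumeArgA cs orig b0 b1 level pos =
        match scanB s b0 b1 level j with
        | none => none
        | some j' =>
          let arg := (orig.drop 1).take (pos + (j' - j) - 2)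
          if pvHasTQ arg then none else some (pvFmt arg, orig.drop (pos + (j' - j)))
    := by
  intro cs
  induction cs with
  | nil =>
    intro orig j level pos hcs
    have hj : ¬ j < s.length := by
      have := congrArg List.length hcs; simp at this; omega
    rw [scanB]
    simp [consumeArgA, hj]
  | cons c rest ih =>
    intro orig j level pos hcs
    have hj : j < s.length := by
      have := congrArg List.length hcs; simp at this; omega
    have hcs' : s[j] :: s.drop (j+1) = c :: rest := (List.drop_eq_getElem_cons hj) ▸ hcs.symm
    have hc : s[j] = c := by injection hcs'
    have hrest : rest = s.drop (j+1) := by injection hcs' with _ h; exact h.symm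
    rw [consumeArgA, scanB]
    simp only [hj, dif_pos, hc]
    by_cases hl : (if c = b0 then level + 1 else if c = b1 then level - 1 else level) = 0
    · simp only [hl, if_pos, if_true]
      have h1 : j + 1 - j = 1 := by omega
      simp [h1]
    · simp only [hl, if_neg, if_false]
      rw [ih orig (j+1) _ (pos+1) hrest]
      cases hscan : scanB s b0 b1 (if c = b0 then level + 1 else if c = b1 then level - 1 else level) (j+1) with
      | none => simp
      | some j' =>
        have := scanB_lt s b0 b1 _ _ _ hscan
        have e1 : pos + 1 + (j' - (j+1)) = pos + (j' - j) := by omega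
        simp [e1]

theorem loop_corr (s : List Char) (opt : Option (List Char))
    (hopt : ∀ o, opt = some o → o ≠ []) :
    ∀ (fa : Nat) (fb : Nat) (i : Nat) (args : List (List Char)),
      s.length - i < fa → s.length - i < fb →
      consumeArgsLoopA fa (s.drop i) args opt =
        (loopB s fb i args).map
          (fun p => (p.1 ++ (match opt with | some o => [o] | none => []), s.drop p.2)) := by
  intro fa
  induction fa with
  | zero => intro fb i args hfa hfb; omega
  | succ fa ih =>
    intro fb i args hfa hfb
    obtain ⟨fb2, rfl⟩ : ∃ fb'', fb = fb'' + 1 := ⟨fb - 1, by omega⟩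
    simp only [consumeArgsLoopA, loopB]
    rw [skipB_eq s i]
    have hdd : (s.drop i).drop (countSpacesA (s.drop i)) = s.drop (i + countSpacesA (s.drop i)) := by
      simp [List.drop_drop, Nat.add_comm]
    set p := countSpacesA (s.drop i) with hp
    rw [hdd]
    by_cases hlt : i + p < s.length
    · have hget : s.drop (i + p) = s[i + p] :: s.drop (i + p + 1) := List.drop_eq_getElem_cons hlt
      rw [hget]
      simp only [dif_pos hlt]
      by_cases hbrace : s[i + p] = '{'
      · have hget2 : s.drop (i + p) = '{' :: s.drop (i + p + 1) := by rw [hget, hbrace]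
        simp only [hbrace, if_pos rfl, if_true]
        rw [scan_corr s '{' '}' _ _ (i + p) 0 0 hget2.symm]
        rw [← hget2]
        cases hscan : scanB s '{' '}' 0 (i + p) with
        | none => simp
        | some j' =>
          have hj' := scanB_lt s '{' '}' 0 (i + p) j' hscan
          simp only
          have harg : ((s.drop (i + p)).drop 1).take (0 + (j' - (i + p)) - 2) = contentB s (i + p) j' := by
            rw [contentB, List.drop_drop]
            have e1 : 0 + (j' - (i + p)) - 2 = j' - 1 - (i + p + 1) := by omega
            have e2 : 1 + (i + p) = i + p + 1 := by omega
            rw [e1]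
          rw [harg]
          by_cases htq : pvHasTQ (contentB s (i + p) j') = true
          · simp [htq]
          · simp only [htq, if_false, Bool.false_eq_true]
            have hdr : (s.drop (i + p)).drop (0 + (j' - (i + p))) = s.drop j' := by
              rw [List.drop_drop]; congr 1; omega
            rw [hdr]
            exact ih fb2 j' (args ++ [pvFmt (contentB s (i + p) j')]) (by omega) (by omega)
      · simp only [if_neg hbrace, Option.map_some]
        clear ih
        revert hopt
        cases opt with
        | none => intro _; simp
        | some o => intro hopt; simp [List.isEmpty_iff, hopt o rfl]
    · have hnil : s.drop (i + p) = [] := by rw [List.drop_eq_nil_iff]; omega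
      rw [hnil]
      simp only [dif_neg hlt, Option.map_some]
      clear ih
      revert hopt
      cases opt with
      | none => intro _; simp
      | some o => intro hopt; simp [List.isEmpty_iff, hopt o rfl]

theorem res_corr (s : List Char) :
    resA s = (resB s).map (fun p => (p.1, s.drop p.2)) := by
  simp only [resA, resB]
  rw [skipB_eq]
  simp only [List.drop_zero, Nat.zero_add]
  split
  next heq =>
    have hlt : countSpacesA s < s.length := by
      have := congrArg List.length heq; simp at this; omega
    have hbrk : s[countSpacesA s] = '[' := by
      rw [List.drop_eq_getElem_cons hlt] at heq; injection heq
    rw [dif_pos hlt, if_pos hbrk]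
    rw [scan_corr s '[' ']' _ _ (countSpacesA s) 0 0 rfl]
    cases hscan : scanB s '[' ']' 0 (countSpacesA s) with
    | none => simp
    | some j' =>
      have hj' := scanB_lt s '[' ']' 0 (countSpacesA s) j' hscan
      simp only
      have harg : ((s.drop (countSpacesA s)).drop 1).take
          (0 + (j' - countSpacesA s) - 2) = contentB s (countSpacesA s) j' := by
        rw [contentB, List.drop_drop]
        have e1 : 0 + (j' - countSpacesA s) - 2 = j' - 1 - (countSpacesA s + 1) := by omega
        rw [e1]
      rw [harg]
      by_cases htq : pvHasTQ (contentB s (countSpacesA s) j') = true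
      · simp [htq]
      · simp only [htq, if_false, Bool.false_eq_true]
        have hdr : (s.drop (countSpacesA s)).drop (0 + (j' - countSpacesA s))
            = s.drop j' := by
          rw [List.drop_drop]; congr 1; omega
        rw [hdr]
        have hlc := loop_corr s (some (pvFmt (contentB s (countSpacesA s) j')))
          (by intro o ho; cases ho; simp [pvFmt])
          ((s.drop j').length + 1) (s.length + 1) j' []
          (by simp) (by omega)
        rw [hlc]
        cases hloop : loopB s (s.length + 1) j' [] with
        | none => simp
        | some q => simp
  next x hx =>
    have hstep : (if h : countSpacesA s < s.length then
        if s[countSpacesA s] = '[' then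
          (match scanB s '[' ']' 0 (countSpacesA s) with
           | none => none
           | some j' =>
             if pvHasTQ (contentB s (countSpacesA s) j') = true then none
             else some (some (pvFmt (contentB s (countSpacesA s) j')), j'))
        else some (none, 0)
      else some (none, 0)) = some ((none : Option (List Char)), 0) := by
      split
      · next h1 =>
        rw [if_neg]
        intro h2
        exact hx (s.drop (countSpacesA s + 1))
          (by rw [List.drop_eq_getElem_cons h1, h2])
      · rfl
    rw [hstep]
    simp only
    have hlc := loop_corr s none (by intro o ho; cases ho)
      (s.length + 1) (s.length + 1) 0 [] (by omega) (by omega)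
    rw [List.drop_zero] at hlc
    rw [hlc]
    cases loopB s (s.length + 1) 0 [] with
    | none => simp
    | some q => simp

theorem main_eq (l : String) : consume_args l = consume_args_alt l := by
  simp only [consume_args, consume_args_alt, res_corr]
  cases resB l.toList with
  | none => simp
  | some q => simp

-- ===== VERDICT (by name: the statement is the Claim_ definition above) =====
theorem consume_args_spec : Claim_equal_consume_args := by
  intro l _ _
  show consume_args l = consume_args_alt l
  exact main_eq l
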